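-- pv_equiv track=rewrite | github.com/dongyeon-0822/Algorithm | Baekjoon/String/4659_pronouncePwd.py | is_pronounced
-- ===== SOURCE A (Python) =====
-- def is_pronounced(s):
--     vowel = ['a','e','i','o','u']
--
--     if len(set(vowel) & set(s)) == 0: # 모음을 반드시 하나 포함 하는지
--         return False
--
--     first = s[0]
--     flag = False # 모음이면 True, 자음이면 False
--     if first in vowel:
--         flag = True
--     count = 1
--     for i in range(1,len(s)):
--         if s[i] in vowel and flag: # 모음 연속이면
--             count += 1
--         elif s[i] in vowel and not flag: # 자음->모음이면
--             count = 1
--             flag = True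
--         elif s[i] not in vowel and not flag: # 자음 연속이면
--             count += 1
--         elif s[i] not in vowel and flag: # 자음 -> 모음이면
--             count = 1
--             flag = False
--         if count >= 3:
--             return False
--         if s[i - 1] == s[i] and s[i] != 'e' and s[i] != 'o':
--             return False
--     return True
-- ===== SOURCE B (Python) =====
-- def is_pronounced(s):
--     vowels = set('aeiou')
--     if vowels.isdisjoint(s):
--         return False
--     t = [c in vowels for c in s]
--     if any(t[i] == t[i + 1] == t[i + 2] for i in range(len(t) - 2)):
--         return False
--     if any(s[i] == s[i + 1] and s[i] not in 'eo' for i in range(len(s) - 1)):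
--         return False
--     return True
-- ===== Notes on version B (the rewrite author's own statement) =====
-- stated objective: simpler
-- what changed: Replaced A's stateful flag/run-length accumulator loop with early returns by three independent stateless checks: a set-disjointness vowel test, a windowed scan of index triples for three same-type letters in a row, and a windowed scan of adjacent pairs for a repeated letter other than 'e'/'o'.
import Mathlib
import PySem

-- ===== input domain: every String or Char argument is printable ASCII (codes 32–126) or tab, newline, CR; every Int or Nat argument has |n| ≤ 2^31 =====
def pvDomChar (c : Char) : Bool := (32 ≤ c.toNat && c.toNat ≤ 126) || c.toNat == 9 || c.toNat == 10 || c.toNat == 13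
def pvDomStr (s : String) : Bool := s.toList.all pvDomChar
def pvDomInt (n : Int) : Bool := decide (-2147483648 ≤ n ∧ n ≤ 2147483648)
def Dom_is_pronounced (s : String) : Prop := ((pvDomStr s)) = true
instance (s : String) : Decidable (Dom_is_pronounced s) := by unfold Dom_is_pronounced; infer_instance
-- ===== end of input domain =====

-- B replaces A's stateful flag/run-length loop by three independent stateless checks
-- (set-disjointness vowel test, windowed triple scan, windowed adjacent-pair scan); objective: simpler.


-- ===== PORT A =====
def pvVowel : List Char := ['a', 'e', 'i', 'o', 'u']

-- the for-loop over range(1, len(s)) with its two early returns; state (flag, count)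
def isPronLoop (cs : List Char) (idxs : List Nat) (flag : Bool) (count : Int) : Bool :=
  match idxs with
  | [] => true
  | i :: rest =>
    let c := cs.getD i ' '   -- s[i]; i always in range for range(1, len(s))
    let fc : Bool × Int :=
      if pvVowel.contains c && flag then (flag, count + 1)
      else if pvVowel.contains c && !flag then (true, 1)
      else if !(pvVowel.contains c) && !flag then (flag, count + 1)
      else (false, 1)
    if fc.2 ≥ 3 then false
    else if cs.getD (i - 1) ' ' == c && !(c == 'e') && !(c == 'o') then false
    else isPronLoop cs rest fc.1 fc.2

def is_pronounced (s : String) : Bool :=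
  let cs := s.toList
  if PySem.Set.len (PySem.Set.inter (PySem.Set.ofList pvVowel) (PySem.Set.ofList cs)) == 0 then
    false
  else
    let first := cs.getD 0 ' '   -- s[0]; safe: a vowel occurs in s, so s is nonempty
    let flag := if pvVowel.contains first then true else false
    isPronLoop cs (List.range' 1 (cs.length - 1)) flag 1

-- ===== PORT B =====
def is_pronounced_alt (s : String) : Bool :=
  let cs := s.toList
  let vowels : PySem.Set Char := PySem.Set.ofList ['a', 'e', 'i', 'o', 'u']
  if PySem.Set.isdisjoint vowels cs then false
  else
    let t := cs.map (fun c => PySem.Set.contains vowels c)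
    if (List.range (t.length - 2)).any
        (fun i => (t.getD i false == t.getD (i + 1) false) && (t.getD (i + 1) false == t.getD (i + 2) false)) then
      false
    else if (List.range (cs.length - 1)).any
        (fun i => (cs.getD i ' ' == cs.getD (i + 1) ' ') && !((['e', 'o'] : List Char).contains (cs.getD i ' '))) then
      -- s[i] not in 'eo': membership of a 1-char string in 'eo' is char membership
      false
    else true

-- ===== PRECONDITION & SPEC =====
def Spec_is_pronounced (s : String) (out : Bool) : Prop := out = is_pronounced_alt s
instance (s : String) (out : Bool) : Decidable (Spec_is_pronounced s out) := by unfold Spec_is_pronounced; infer_instance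

-- ===== CLAIM (what is proved, stated in full; the proofs are below) =====
def Claim_equal_is_pronounced : Prop := ∀ (s : String), Dom_is_pronounced s → Spec_is_pronounced s (is_pronounced s)

-- ===== LEMMAS AND PROOFS =====

-- type (vowel?) of the character at index i
def tcv (cs : List Char) (i : Nat) : Bool := pvVowel.contains (cs.getD i ' ')

-- violation "three letters of one type end at j"
def tripleV (cs : List Char) (j : Nat) : Bool :=
  decide (2 ≤ j) && (tcv cs (j - 2) == tcv cs (j - 1)) && (tcv cs (j - 1) == tcv cs j)

-- violation "repeated letter other than 'e'/'o' ends at j" (A's form, keyed on s[j])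
def doubleV (cs : List Char) (j : Nat) : Bool :=
  (cs.getD (j - 1) ' ' == cs.getD j ' ') && !(cs.getD j ' ' == 'e') && !(cs.getD j ' ' == 'o')

theorem isPronLoop_cons (cs : List Char) (i : Nat) (rest : List Nat) (flag : Bool) (count : Int) :
    isPronLoop cs (i :: rest) flag count =
      if tcv cs i == flag then
        (if count + 1 ≥ 3 then false
         else if doubleV cs i then false
         else isPronLoop cs rest flag (count + 1))
      else
        (if doubleV cs i then false
         else isPronLoop cs rest (tcv cs i) 1) := by
  by_cases hfv : cs[i]?.getD ' ' ∈ pvVowel <;> cases flag <;>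
    simp [isPronLoop, tcv, doubleV, hfv]

theorem isPronLoop_eq_all (cs : List Char) (m : Nat) :
    ∀ (i : Nat) (count : Int), 1 ≤ i →
      (count = 1 ∨ count = 2) →
      (count = 2 ↔ (2 ≤ i ∧ tcv cs (i - 2) = tcv cs (i - 1))) →
      isPronLoop cs (List.range' i m) (tcv cs (i - 1)) count
        = (List.range' i m).all (fun j => !(tripleV cs j || doubleV cs j)) := by
  induction m with
  | zero => intro i count _ _ _; rfl
  | succ m ih =>
    intro i count hi hc12 hc2
    rw [List.range'_succ, List.all_cons, isPronLoop_cons]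
    by_cases hv : tcv cs i = tcv cs (i - 1)
    · rw [if_pos (by simp [hv])]
      rcases hc12 with rfl | rfl
      · -- count = 1, same type: no triple ends here
        rw [if_neg (by norm_num)]
        have h3 : tripleV cs i = false := by
          by_cases h2 : 2 ≤ i
          · have hne : tcv cs (i - 2) ≠ tcv cs (i - 1) := fun h => by
              have := hc2.mpr ⟨h2, h⟩; norm_num at this
            simp [tripleV, hne]
          · simp [tripleV, h2]
        rw [h3, Bool.false_or]
        cases hd : doubleV cs i
        · simp only [Bool.false_eq_true, if_false, Bool.not_false, Bool.true_and]
          rw [← hv]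
          exact ih (i + 1) 2 (by omega) (Or.inr rfl)
            ⟨fun _ => ⟨by omega, show tcv cs (i - 1) = tcv cs i from hv.symm⟩, fun _ => rfl⟩
        · simp
      · -- count = 2, same type: triple ends here, both sides reject
        rw [if_pos (by norm_num)]
        obtain ⟨h2i, heq⟩ := hc2.mp rfl
        have h3 : tripleV cs i = true := by simp [tripleV, h2i, heq, hv]
        simp [h3]
    · -- type changes: run restarts at length 1
      rw [if_neg (by simp [hv])]
      have h3 : tripleV cs i = false := by
        have hne : tcv cs (i - 1) ≠ tcv cs i := fun h => hv h.symm
        simp [tripleV, hne]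
      rw [h3, Bool.false_or]
      cases hd : doubleV cs i
      · simp only [Bool.false_eq_true, if_false, Bool.not_false, Bool.true_and]
        exact ih (i + 1) 1 (by omega) (Or.inl rfl)
          ⟨fun h => by norm_num at h, fun h => absurd h.2.symm hv⟩
      · simp

theorem all_bool_split (l : List Nat) (p q : Nat → Bool) :
    (l.all fun j => !(p j || q j)) = ((l.all fun j => !p j) && (l.all fun j => !q j)) := by
  induction l with
  | nil => rfl
  | cons a l ih =>
    rw [List.all_cons, List.all_cons, List.all_cons, ih]
    cases p a <;> cases q a <;> cases (l.all fun j => !p j) <;> cases (l.all fun j => !q j) <;> rfl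

theorem split_triple (cs : List Char) :
    (List.range' 1 (cs.length - 1)).all (fun j => !(tripleV cs j))
      = (List.range' 2 (cs.length - 2)).all (fun j => !(tripleV cs j)) := by
  cases hcl : cs.length with
  | zero => rfl
  | succ n =>
    cases n with
    | zero => rfl
    | succ k =>
      have h1 : k + 1 + 1 - 1 = k + 1 := rfl
      have h2 : k + 1 + 1 - 2 = k := rfl
      rw [h1, h2, List.range'_succ]
      have ht1 : tripleV cs 1 = false := by simp [tripleV]
      simp [ht1]

theorem tmap_getD (cs : List Char) (f : Char → Bool) (j : Nat) (h : j < cs.length) :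
    (cs.map f).getD j false = f (cs.getD j ' ') := by
  rw [List.getD_eq_getElem?_getD, List.getElem?_map, List.getElem?_eq_getElem h,
      Option.map_some, Option.getD_some, List.getD_eq_getElem cs ' ' h]

theorem set_contains_vowel (c : Char) :
    PySem.Set.contains (PySem.Set.ofList ['a', 'e', 'i', 'o', 'u']) c = pvVowel.contains c := by
  rw [show PySem.Set.ofList ['a', 'e', 'i', 'o', 'u'] = pvVowel from by decide]
  simp [PySem.Set.contains_eq_listContains]

theorem triple_any (cs : List Char) :
    ((List.range (cs.length - 2)).any
        (fun k => ((cs.map (fun c => PySem.Set.contains (PySem.Set.ofList ['a', 'e', 'i', 'o', 'u']) c)).getD k false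
              == (cs.map (fun c => PySem.Set.contains (PySem.Set.ofList ['a', 'e', 'i', 'o', 'u']) c)).getD (k + 1) false)
            && ((cs.map (fun c => PySem.Set.contains (PySem.Set.ofList ['a', 'e', 'i', 'o', 'u']) c)).getD (k + 1) false
              == (cs.map (fun c => PySem.Set.contains (PySem.Set.ofList ['a', 'e', 'i', 'o', 'u']) c)).getD (k + 2) false)))
      = (List.range' 2 (cs.length - 2)).any (fun j => tripleV cs j) := by
  rw [List.range'_eq_map_range, List.any_map]
  rw [Bool.eq_iff_iff]
  simp only [List.any_eq_true, List.mem_range, Function.comp]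
  have point : ∀ k, k < cs.length - 2 →
      (((cs.map (fun c => PySem.Set.contains (PySem.Set.ofList ['a', 'e', 'i', 'o', 'u']) c)).getD k false
          == (cs.map (fun c => PySem.Set.contains (PySem.Set.ofList ['a', 'e', 'i', 'o', 'u']) c)).getD (k + 1) false)
        && ((cs.map (fun c => PySem.Set.contains (PySem.Set.ofList ['a', 'e', 'i', 'o', 'u']) c)).getD (k + 1) false
          == (cs.map (fun c => PySem.Set.contains (PySem.Set.ofList ['a', 'e', 'i', 'o', 'u']) c)).getD (k + 2) false))
      = tripleV cs (2 + k) := by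
    intro k hk
    have e0 : 2 + k - 2 = k := by omega
    have e1 : 2 + k - 1 = k + 1 := by omega
    have e2 : 2 + k = k + 2 := by omega
    have hk0 : k < cs.length := by omega
    have hk1 : k + 1 < cs.length := by omega
    have hk2 : k + 2 < cs.length := by omega
    simp only [tripleV, e2, tmap_getD cs _ k hk0, tmap_getD cs _ (k + 1) hk1,
      tmap_getD cs _ (k + 2) hk2, set_contains_vowel, tcv]
    simp
  constructor
  · rintro ⟨k, hk, hb⟩; exact ⟨k, hk, by rw [← point k hk]; exact hb⟩
  · rintro ⟨k, hk, hb⟩; exact ⟨k, hk, by rw [point k hk]; exact hb⟩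

theorem contains_eo (c : Char) :
    ((['e', 'o'] : List Char).contains c) = ((c == 'e') || (c == 'o')) := by
  simp only [List.contains_eq_any_beq, List.any_cons, List.any_nil, Bool.or_false]

theorem double_any (cs : List Char) :
    ((List.range (cs.length - 1)).any
        (fun k => (cs.getD k ' ' == cs.getD (k + 1) ' ') && !((['e', 'o'] : List Char).contains (cs.getD k ' '))))
      = (List.range' 1 (cs.length - 1)).any (fun j => doubleV cs j) := by
  rw [List.range'_eq_map_range, List.any_map]
  congr 1
  funext k
  show _ = doubleV cs (1 + k)
  have e0 : 1 + k - 1 = k := by omega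
  have e1 : 1 + k = k + 1 := by omega
  rw [doubleV, e0, e1]
  cases hab : (cs.getD k ' ' == cs.getD (k + 1) ' ')
  · simp
  · have heq : cs.getD k ' ' = cs.getD (k + 1) ' ' := eq_of_beq hab
    rw [heq, contains_eo]
    cases (cs.getD (k + 1) ' ' == cs.getD (k + 1) ' ') <;>
      cases (cs.getD (k + 1) ' ' == 'e') <;> cases (cs.getD (k + 1) ' ' == 'o') <;> rfl

theorem vowel_check (cs : List Char) :
    (PySem.Set.len (PySem.Set.inter (PySem.Set.ofList pvVowel) (PySem.Set.ofList cs)) == 0)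
      = PySem.Set.isdisjoint (PySem.Set.ofList ['a', 'e', 'i', 'o', 'u']) cs := by
  rw [Bool.eq_iff_iff]
  constructor
  · intro h
    rw [PySem.Set.isdisjoint_iff]
    intro x hx hxc
    have hlen : (PySem.Set.inter (PySem.Set.ofList pvVowel) (PySem.Set.ofList cs)).length = 0 := by
      simpa [PySem.Set.len] using h
    have hnil := List.length_eq_zero_iff.mp hlen
    have hx' : x ∈ pvVowel := (PySem.Set.mem_ofList _ _).mp hx
    have hmem : x ∈ PySem.Set.inter (PySem.Set.ofList pvVowel) (PySem.Set.ofList cs) :=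
      (PySem.Set.mem_inter _ _ _).mpr
        ⟨(PySem.Set.mem_ofList _ _).mpr hx', (PySem.Set.mem_ofList _ _).mpr hxc⟩
    rw [hnil] at hmem
    exact absurd hmem (List.not_mem_nil)
  · intro h
    rw [PySem.Set.isdisjoint_iff] at h
    have hnil : PySem.Set.inter (PySem.Set.ofList pvVowel) (PySem.Set.ofList cs) = [] := by
      rw [List.eq_nil_iff_forall_not_mem]
      intro x hx
      obtain ⟨h1, h2⟩ := (PySem.Set.mem_inter _ _ _).mp hx
      exact h x ((PySem.Set.mem_ofList _ _).mpr ((PySem.Set.mem_ofList _ _).mp h1))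
        ((PySem.Set.mem_ofList _ _).mp h2)
    simp [PySem.Set.len, hnil]

-- ===== VERDICT (by name: the statement is the Claim_ definition above) =====
theorem is_pronounced_spec : Claim_equal_is_pronounced := by
  unfold Claim_equal_is_pronounced
  intro s _
  show is_pronounced s = is_pronounced_alt s
  simp only [is_pronounced, is_pronounced_alt]
  rw [vowel_check s.toList]
  cases hdis : PySem.Set.isdisjoint (PySem.Set.ofList ['a', 'e', 'i', 'o', 'u']) s.toList
  · -- vowel present: both proceed past the guard
    simp only [Bool.false_eq_true, if_false]
    have hflag : (if pvVowel.contains (s.toList.getD 0 ' ') then true else false) = tcv s.toList 0 := by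
      unfold tcv
      cases pvVowel.contains (s.toList.getD 0 ' ') <;> rfl
    rw [hflag]
    rw [isPronLoop_eq_all s.toList (s.toList.length - 1) 1 1 le_rfl (Or.inl rfl)
      ⟨fun h => by norm_num at h, fun h => absurd h.1 (by omega)⟩]
    rw [all_bool_split, split_triple, List.length_map]
    rw [triple_any, double_any]
    have hAT : (List.range' 2 (s.toList.length - 2)).all (fun j => !tripleV s.toList j)
        = !((List.range' 2 (s.toList.length - 2)).any fun j => tripleV s.toList j) := by
      rw [List.all_eq_not_any_not]
      simp only [Bool.not_not]
    have hAD : (List.range' 1 (s.toList.length - 1)).all (fun j => !doubleV s.toList j)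
        = !((List.range' 1 (s.toList.length - 1)).any fun j => doubleV s.toList j) := by
      rw [List.all_eq_not_any_not]
      simp only [Bool.not_not]
    rw [hAT, hAD]
    cases (List.range' 2 (s.toList.length - 2)).any (fun j => tripleV s.toList j) <;>
      cases (List.range' 1 (s.toList.length - 1)).any (fun j => doubleV s.toList j) <;> rfl
  · rfl
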